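-- pv_equiv track=rewrite | github.com/nlumiere/NicksUtilsBot | MathParser.py | isolate
-- ===== SOURCE A (Python) =====
-- MATH_SYMBOLS = ['+', '-', '*', '/', '^', '&', '|', '(', ')', '%']
--
-- def isolate(arg):
--     args = []
--     zero = 0
--     for i in range(len(arg)):
--         if arg[i] in MATH_SYMBOLS:
--             if i != zero:
--                 args.append(arg[zero:i])
--             args.append(arg[i])
--             zero = i+1
--     if arg[zero:]:
--         args.append(arg[zero:])
--
--     return args
-- ===== SOURCE B (Python) =====
-- MATH_SYMBOLS = ['+', '-', '*', '/', '^', '&', '|', '(', ')', '%']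
--
-- def isolate(arg):
--     SYMS = "+-*/^&|()%"
--     args = []
--     cur = []
--     for ch in arg:
--         if ch in SYMS:
--             if cur:
--                 args.append(''.join(cur))
--                 cur = []
--             args.append(ch)
--         else:
--             cur.append(ch)
--     if cur:
--         args.append(''.join(cur))
--     return args
-- ===== Notes on version B (the rewrite author's own statement) =====
-- stated objective: alternative
-- what changed: Replaces A's index loop with a start-marker and string slicing by a single pass over the characters that accumulates the current operand in a buffer and flushes it at each operator; no indices or slices.
import Mathlib
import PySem

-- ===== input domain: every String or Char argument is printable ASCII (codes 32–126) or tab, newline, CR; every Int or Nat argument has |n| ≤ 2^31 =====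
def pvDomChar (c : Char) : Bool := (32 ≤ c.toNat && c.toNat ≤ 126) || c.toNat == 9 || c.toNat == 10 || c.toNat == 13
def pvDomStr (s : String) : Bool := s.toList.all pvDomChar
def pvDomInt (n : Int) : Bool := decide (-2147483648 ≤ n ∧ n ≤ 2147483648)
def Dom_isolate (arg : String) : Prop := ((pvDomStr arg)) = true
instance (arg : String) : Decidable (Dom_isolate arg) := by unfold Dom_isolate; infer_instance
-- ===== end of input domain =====

-- B replaces A's index loop with a start marker and slicing by a single pass that
-- accumulates the current operand in a character buffer; same output, same O(n) cost.

-- ===== PORT A =====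
def mathSymbols : List Char := ['+', '-', '*', '/', '^', '&', '|', '(', ')', '%']

-- one iteration of A's 'for i in range(len(arg))' body; state = (args, zero)
def isolateStepA (cs : List Char) (st : List String × Int) (i : Int) : List String × Int :=
  if PySem.List.pyGetD cs i ' ' ∈ mathSymbols then
    let args := if i ≠ st.2 then st.1 ++ [String.ofList (PySem.List.slice cs (some st.2) (some i))] else st.1
    (args ++ [String.ofList [PySem.List.pyGetD cs i ' ']], i + 1)
  else st

def isolate (arg : String) : List String :=
  let cs := arg.toList
  let st := (PySem.List.pyRange 0 (PySem.List.len cs) 1).foldl (isolateStepA cs) ([], 0)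
  let tail := PySem.List.slice cs (some st.2) none
  if tail ≠ [] then st.1 ++ [String.ofList tail] else st.1

-- ===== PORT B =====
-- one iteration of B's 'for ch in arg' body; state = (args, cur)
def isolateStepB (st : List String × List Char) (ch : Char) : List String × List Char :=
  if ch ∈ "+-*/^&|()%".toList then
    let args := if st.2 ≠ [] then st.1 ++ [String.ofList st.2] else st.1
    (args ++ [String.ofList [ch]], [])
  else (st.1, st.2 ++ [ch])

def isolate_alt (arg : String) : List String :=
  let st := arg.toList.foldl isolateStepB ([], [])
  if st.2 ≠ [] then st.1 ++ [String.ofList st.2] else st.1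

-- ===== PRECONDITION & SPEC =====
def Spec_isolate (arg : String) (out : List String) : Prop := out = isolate_alt arg
instance (arg : String) (out : List String) : Decidable (Spec_isolate arg out) := by unfold Spec_isolate; infer_instance

-- ===== CLAIM (what is proved, stated in full; the proofs are below) =====
def Claim_equal_isolate : Prop := ∀ (arg : String), Dom_isolate arg → Spec_isolate arg (isolate arg)

-- ===== LEMMAS AND PROOFS =====

-- B's symbol string holds exactly A's MATH_SYMBOLS characters
theorem syms_eq : "+-*/^&|()%".toList = mathSymbols := by decide

-- loop invariant: after the first n steps, A's args equal B's args, A's marker zero is a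
-- Nat z ≤ n, and B's buffer is exactly the not-yet-sliced segment cs[z:n]
theorem isolate_loop_inv (cs : List Char) : ∀ n : Nat, n ≤ cs.length →
    ∃ z : Nat, z ≤ n ∧
      ((PySem.List.pyRange 0 (cs.length : Int) 1).take n).foldl (isolateStepA cs) ([], 0)
        = (((cs.take n).foldl isolateStepB ([], [])).1, (z : Int)) ∧
      ((cs.take n).foldl isolateStepB ([], [])).2 = (cs.drop z).take (n - z) := by
  intro n
  induction n with
  | zero => intro _; exact ⟨0, le_rfl, by simp, by simp⟩
  | succ n ih =>
    intro hn
    have hlt : n < cs.length := hn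
    obtain ⟨z, hz, hA, hcur⟩ := ih (le_of_lt hlt)
    have hr : ((PySem.List.pyRange 0 (cs.length : Int) 1).take (n+1))
        = ((PySem.List.pyRange 0 (cs.length : Int) 1).take n) ++ [(n : Int)] := by
      rw [PySem.List.pyRange_zero_natCast, ← List.map_take, ← List.map_take,
        List.take_range, List.take_range]
      have h1 : min (n+1) cs.length = n+1 := by omega
      have h2 : min n cs.length = n := by omega
      rw [h1, h2, List.range_succ, List.map_append]
      simp
    have hc : cs.take (n+1) = cs.take n ++ [cs[n]] := by
      rw [← List.take_concat_get hlt, List.concat_eq_append]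
    rw [hr, hc, List.foldl_concat, List.foldl_concat, hA]
    rcases hBs : List.foldl isolateStepB ([], []) (cs.take n) with ⟨B1, cur⟩
    rw [hBs] at hA hcur
    replace hcur : cur = List.take (n - z) (List.drop z cs) := hcur
    have hget : PySem.List.pyGetD cs ((n : Nat) : Int) ' ' = cs[n] := by
      rw [PySem.List.pyGetD_natCast, List.getD_eq_getElem _ _ hlt]
    by_cases hmem : cs[n] ∈ mathSymbols
    · -- operator: both flush the pending operand (iff it is nonempty) and append the symbol
      refine ⟨n + 1, le_rfl, ?_, ?_⟩
      · by_cases hnz : n = z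
        · subst hnz
          have hcur0 : cur = [] := by rw [hcur]; simp
          subst hcur0
          simp [isolateStepA, isolateStepB, hget, syms_eq, hmem]
        · have hzlt : z < n := lt_of_le_of_ne hz (fun h => hnz h.symm)
          have hne : cur ≠ [] := by
            rw [hcur]
            apply List.ne_nil_of_length_pos
            simp only [List.length_take, List.length_drop]
            omega
          have hneInt : ((n : Int) ≠ (z : Int)) := by exact_mod_cast hnz
          have hsl : PySem.List.slice cs (some (z : Int)) (some (n : Int)) = cur := by
            rw [PySem.List.slice_natCast, hcur]
          simp [isolateStepA, isolateStepB, hget, syms_eq, hmem, hne, hneInt, hsl]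
      · simp [isolateStepB, syms_eq, hmem]
    · -- ordinary character: A's state is unchanged, B extends the buffer by one char
      refine ⟨z, by omega, ?_, ?_⟩
      · simp [isolateStepA, isolateStepB, hget, syms_eq, hmem]
      · simp only [isolateStepB, syms_eq, hmem, if_neg, not_false_iff]
        have hdl : n - z < (cs.drop z).length := by simp; omega
        have hel : (cs.drop z)[n - z]'hdl = cs[n] := by
          rw [List.getElem_drop]
          congr 1
          omega
        have hstep := List.take_concat_get (l := cs.drop z) (i := n - z) hdl
        rw [List.concat_eq_append, hel] at hstep
        simp only [hcur, hstep]
        congr 1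
        omega

-- ===== VERDICT (by name: the statement is the Claim_ definition above) =====
theorem isolate_spec : Claim_equal_isolate := by
  intro arg _
  unfold Spec_isolate
  show isolate arg = isolate_alt arg
  obtain ⟨z, hz, hA, hcur⟩ := isolate_loop_inv arg.toList arg.toList.length le_rfl
  have hfull : (PySem.List.pyRange 0 ((arg.toList.length : Nat) : Int) 1).take arg.toList.length
      = PySem.List.pyRange 0 ((arg.toList.length : Nat) : Int) 1 := by
    apply List.take_of_length_le
    rw [PySem.List.pyRange_zero_natCast]
    simp
  rw [hfull] at hA
  rw [List.take_length] at hA hcur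
  simp only [isolate, isolate_alt, PySem.List.len_eq, hA, hcur]
  rw [PySem.List.slice_from_natCast]
  have hdz : (arg.toList.drop z).take (arg.toList.length - z) = arg.toList.drop z := by
    apply List.take_of_length_le
    simp
  rw [hdz]
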